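-- pv_equiv track=rewrite | github.com/Kir93/python-algorithm | 백준/bojStarter2/4149.py | pola
-- ===== SOURCE A (Python) =====
-- def powmod(a,b,m):
--     result = 1
--     while b > 0:
--         if b % 2 != 0:
--             result = (result * a) % m
--         b //= 2
--         a = (a * a) % m
--
--     return result
--
-- def mr(n,a):
--     r = 0
--     d = n-1
--     while (d%2 == 0):
--         r += 1
--         d = d // 2
--     x = powmod(a,d,n)
--     if x == 1 or x == n-1:
--         return True
--     for i in range(0,r-1):
--         x = powmod(x,2,n)
--         if x == n-1:
--             return True
--     return False
--
-- def check_prime(k):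
--     check = 0
--     if k <= 71:
--         if k in [2, 3, 5, 7, 11, 13, 17, 19, 23, 29, 31, 37, 41, 43, 47, 53, 59, 61, 67, 71]:
--             return True
--         else:
--             return False
--     else:
--         for i in [ 2, 3, 5, 7, 11, 13, 17, 19, 23, 29, 31, 37]:
--             if mr(k,i) == False:
--                 break
--             else:
--                 check += 1
--         if check == 12:
--             return True
--         else:
--             return False
--
-- def gcd(a, b):
--     if b > a:
--         k = a
--         a = b
--         b = k
--     while b != 0:
--         r = a % b
--         a = b
--         b = r
--     return a
--
-- def g(x,n):
--     return ((x*x) + 1) % n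
--
-- def pola(n,x):
--     p = x
--     if check_prime(n):
--         return n
--     else:
--         for i in [2, 3, 5, 7, 11, 13, 17, 19, 23, 29, 31, 37, 41, 43, 47, 53, 59, 61, 67, 71]:
--             if n % i == 0:
--                 return i
--         y = x
--         d = 1
--         while d == 1:
--             x = g(x,n)
--             y = g(g(y,n),n)
--             d = gcd(abs(x-y),n)
--         if d == n:
--             return pola(n,p+1)
--         else:
--             if check_prime(d):
--                 return d
--             else:
--                 return pola(d,2)
-- ===== SOURCE B (Python) =====
-- SMALL = [2, 3, 5, 7, 11, 13, 17, 19, 23, 29, 31, 37, 41, 43, 47, 53, 59, 61, 67, 71]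
--
-- def powmod(a, b, m):
--     # top-down binary exponentiation (recursive), vs A's bottom-up accumulator loop
--     if b <= 0:
--         return 1
--     h = powmod(a * a % m, b // 2, m)
--     return h * a % m if b % 2 != 0 else h
--
-- def mr(n, a):
--     r = 0
--     d = n - 1
--     while d % 2 == 0:
--         r += 1
--         d //= 2
--     x = powmod(a, d, n)
--     if x == 1 or x == n - 1:
--         return True
--     for _ in range(r - 1):
--         x = x * x % n
--         if x == n - 1:
--             return True
--     return False
--
-- def check_prime(k):
--     if k <= 71:
--         return k in SMALL
--     return all(mr(k, i) for i in SMALL[:12])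
--
-- def gcd(a, b):
--     # plain Euclid, no initial swap (equivalent for the nonnegative a used here)
--     while b != 0:
--         a, b = b, a % b
--     return a
--
-- def pola(n, x):
--     # iterative state machine over (n, x, p) replacing A's tail recursion
--     p = x
--     while True:
--         if check_prime(n):
--             return n
--         hit = next((i for i in SMALL if n % i == 0), None)
--         if hit is not None:
--             return hit
--         y = x
--         d = 1
--         while d == 1:
--             x = (x * x + 1) % n
--             y = (y * y + 1) % n
--             y = (y * y + 1) % n
--             d = gcd(abs(x - y), n)
--         if d == n:
--             p += 1
--             x = p
--         elif check_prime(d):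
--             return d
--         else:
--             n, x, p = d, 2, 2
-- ===== Notes on version B (the rewrite author's own statement) =====
-- stated objective: alternative
-- what changed: Same Pollard-rho factor search with a different decomposition throughout: powmod becomes a top-down recursive binary exponentiation instead of A's bottom-up accumulator loop, gcd drops the initial swap, the 12-witness Miller-Rabin check uses all(...) over SMALL[:12] instead of a counter with break, trial division is a find-first scan via next(), g is inlined into the rho loop, and A's tail recursion is replaced by an iterative while-True state machine over (n, x, p).
-- outside the precondition, e.g. on pola(-79, 2): A raises RecursionError, B does not finish within the time limit
import Mathlib
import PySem

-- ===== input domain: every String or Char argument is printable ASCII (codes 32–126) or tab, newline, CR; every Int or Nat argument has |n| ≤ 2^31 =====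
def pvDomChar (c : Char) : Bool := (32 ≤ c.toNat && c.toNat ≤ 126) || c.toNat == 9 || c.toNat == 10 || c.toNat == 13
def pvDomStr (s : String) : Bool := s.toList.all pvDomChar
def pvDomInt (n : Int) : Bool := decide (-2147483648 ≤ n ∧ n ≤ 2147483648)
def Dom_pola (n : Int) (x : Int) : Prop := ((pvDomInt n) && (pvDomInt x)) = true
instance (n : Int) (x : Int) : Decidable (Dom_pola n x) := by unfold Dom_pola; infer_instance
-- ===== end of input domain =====

-- B is an alternative decomposition of the same Pollard-rho factor search: recursive top-down
-- binary powmod (vs A's accumulator loop), swap-free Euclid, an all-of-12-witnesses primality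
-- check (vs A's counter with break), a find-first trial division, the modular step g inlined,
-- and A's tail recursion replaced by an iterative state machine over (n, x, p).

-- ===== PORT A =====
-- while b > 0: loop of powmod; fuel b.toNat+1 exceeds the halving iteration count
def pyPowmodGo : Nat → Int → Int → Int → Int → Int
  | 0, _, _, _, result => result
  | fuel+1, a, b, m, result =>
    if b > 0 then
      let result := if PySem.Int.mod b 2 ≠ 0 then PySem.Int.mod (result * a) m else result
      pyPowmodGo fuel (PySem.Int.mod (a * a) m) (PySem.Int.floordiv b 2) m result
    else result

def pyPowmod (a b m : Int) : Int := pyPowmodGo (b.toNat + 1) a b m 1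

-- while d % 2 == 0: halving loop of mr; returns (r, d); fuel d.toNat+1 suffices for d ≥ 1
def pyMrHalve : Nat → Int → Int → Int × Int
  | 0, r, d => (r, d)
  | fuel+1, r, d =>
    if PySem.Int.mod d 2 = 0 then pyMrHalve fuel (r + 1) (PySem.Int.floordiv d 2) else (r, d)

-- for i in range(0, r-1): squaring loop of mr
def pyMrLoop : Nat → Int → Int → Bool
  | 0, _, _ => false
  | k+1, x, n =>
    let x := pyPowmod x 2 n
    if x = n - 1 then true else pyMrLoop k x n

def pyMr (n a : Int) : Bool :=
  let (r, d) := pyMrHalve ((n - 1).toNat + 1) 0 (n - 1)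
  let x := pyPowmod a d n
  if x = 1 ∨ x = n - 1 then true
  else pyMrLoop (r - 1).toNat x n

-- for i in [...]: if mr(k,i)==False: break else check += 1
def pyCheckLoop (k : Int) : List Int → Int → Int
  | [], check => check
  | i :: rest, check => if pyMr k i = false then check else pyCheckLoop k rest (check + 1)

def pyCheckPrime (k : Int) : Bool :=
  if k ≤ 71 then
    decide (k ∈ ([2, 3, 5, 7, 11, 13, 17, 19, 23, 29, 31, 37, 41, 43, 47, 53, 59, 61, 67, 71] : List Int))
  else
    let check := pyCheckLoop k [2, 3, 5, 7, 11, 13, 17, 19, 23, 29, 31, 37] 0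
    decide (check = 12)

-- while b != 0: Euclid loop; |a| + |b| strictly bounds the iteration count (Python % takes the divisor's sign, so |b| decreases)
def pyGcdGo : Nat → Int → Int → Int
  | 0, a, _ => a
  | fuel+1, a, b => if b ≠ 0 then pyGcdGo fuel b (PySem.Int.mod a b) else a

def pyGcd (a b : Int) : Int :=
  if b > a then pyGcdGo (b.natAbs + a.natAbs + 1) b a
  else pyGcdGo (a.natAbs + b.natAbs + 1) a b

def pyG (x n : Int) : Int := PySem.Int.mod (x * x + 1) n

-- while d == 1: Floyd tortoise-hare loop (do-while form: the Python loop always runs, since d starts at 1);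
-- returns the final d; fuel n.natAbs+2 exceeds the meeting index of the sequence mod n
def pyRho : Nat → Int → Int → Int → Int
  | 0, _, _, _ => 1
  | fuel+1, x, y, n =>
    let x := pyG x n
    let y := pyG (pyG y n) n
    let d := pyGcd ((x - y).natAbs) n
    if d = 1 then pyRho fuel x y n else d

def pyTrialList : List Int := [2, 3, 5, 7, 11, 13, 17, 19, 23, 29, 31, 37, 41, 43, 47, 53, 59, 61, 67, 71]

-- for i in [...]: if n % i == 0: return i
def pyTrial (n : Int) : List Int → Option Int
  | [] => none
  | i :: rest => if PySem.Int.mod n i = 0 then some i else pyTrial n rest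

-- A's recursion, carried on a fuel counter (one unit per recursive call of the Python pola)
def polaFuel : Nat → Int → Int → Int
  | 0, n, _ => n
  | fuel+1, n, x =>
    let p := x
    if pyCheckPrime n then n
    else
      match pyTrial n pyTrialList with
      | some i => i
      | none =>
        let d := pyRho (n.natAbs + 2) x x n
        if d = n then polaFuel fuel n (p + 1)
        else if pyCheckPrime d then d
        else polaFuel fuel d 2

def pola (n : Int) (x : Int) : Int := polaFuel (n.natAbs + 2) n x

-- ===== PORT B =====
def smallPrimes : List Int := [2, 3, 5, 7, 11, 13, 17, 19, 23, 29, 31, 37, 41, 43, 47, 53, 59, 61, 67, 71]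

-- B's recursive powmod: if b <= 0: 1 else h = powmod(a*a%m, b//2, m); h*a%m if odd else h
def bPowGo : Nat → Int → Int → Int → Int
  | 0, _, _, _ => 1
  | fuel+1, a, b, m =>
    if b ≤ 0 then 1
    else
      let h := bPowGo fuel (PySem.Int.mod (a * a) m) (PySem.Int.floordiv b 2) m
      if PySem.Int.mod b 2 ≠ 0 then PySem.Int.mod (h * a) m else h

def bPow (a b m : Int) : Int := bPowGo (b.toNat + 1) a b m

-- B's mr: same halving loop text as A (ported once as pyMrHalve), recursive powmod, x*x%n squaring
def bMrLoop : Nat → Int → Int → Bool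
  | 0, _, _ => false
  | k+1, x, n =>
    let x := PySem.Int.mod (x * x) n
    if x = n - 1 then true else bMrLoop k x n

def bMr (n a : Int) : Bool :=
  let (r, d) := pyMrHalve ((n - 1).toNat + 1) 0 (n - 1)
  let x := bPow a d n
  if x = 1 ∨ x = n - 1 then true
  else bMrLoop (r - 1).toNat x n

-- all(mr(k, i) for i in SMALL[:12])
def bCheckPrime (k : Int) : Bool :=
  if k ≤ 71 then smallPrimes.contains k
  else (smallPrimes.take 12).all (fun i => bMr k i)

-- B's gcd: the same while-loop body as A's, but with no initial swap (ported via the shared loop helper)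
def bGcd (a b : Int) : Int := pyGcdGo (a.natAbs + b.natAbs + 1) a b

-- B's rho loop with g inlined: x=(x*x+1)%n; y=(y*y+1)%n twice; d=gcd(abs(x-y),n)
def bRho : Nat → Int → Int → Int → Int
  | 0, _, _, _ => 1
  | fuel+1, x, y, n =>
    let x := PySem.Int.mod (x * x + 1) n
    let y := PySem.Int.mod (y * y + 1) n
    let y := PySem.Int.mod (y * y + 1) n
    let d := bGcd ((x - y).natAbs) n
    if d = 1 then bRho fuel x y n else d

-- hit = next((i for i in SMALL if n % i == 0), None)
def bTrial (n : Int) : Option Int := smallPrimes.find? (fun i => PySem.Int.mod n i == 0)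

-- one pass of B's while-True body: Sum.inl = return value, Sum.inr = next (n, x, p) state
def bStep (n x p : Int) : Sum Int (Int × Int × Int) :=
  if bCheckPrime n then Sum.inl n
  else
    match bTrial n with
    | some i => Sum.inl i
    | none =>
      let d := bRho (n.natAbs + 2) x x n
      if d = n then Sum.inr (n, p + 1, p + 1)
      else if bCheckPrime d then Sum.inl d
      else Sum.inr (d, 2, 2)

-- the while-True driver, on the same fuel counter
def bIter : Nat → Int → Int → Int → Int
  | 0, n, _, _ => n
  | fuel+1, n, x, p =>
    match bStep n x p with
    | Sum.inl r => r
    | Sum.inr (n', x', p') => bIter fuel n' x' p'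

def pola_alt (n : Int) (x : Int) : Int := bIter (n.natAbs + 2) n x x

-- ===== PRECONDITION & SPEC =====
-- Pre_ excludes exactly the inputs on which the Python A never returns: n ≤ 1 with no trial divisor
-- (n = 1 loops forever in the rho loop; other such n recurse without bound / raise RecursionError).
def Pre_pola (n : Int) (_x : Int) : Prop :=
  2 ≤ n ∨ ∃ i ∈ ([2, 3, 5, 7, 11, 13, 17, 19, 23, 29, 31, 37, 41, 43, 47, 53, 59, 61, 67, 71] : List Int), PySem.Int.mod n i = 0
instance (n : Int) (x : Int) : Decidable (Pre_pola n x) := by unfold Pre_pola; infer_instance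
def pvWitness_pola : Int × Int := (9, 2)

def Spec_pola (n : Int) (x : Int) (out : Int) : Prop := out = pola_alt n x
instance (n : Int) (x : Int) (out : Int) : Decidable (Spec_pola n x out) := by unfold Spec_pola; infer_instance

-- ===== CLAIM =====
def Claim_equal_pola : Prop := ∀ (n : Int) (x : Int), Dom_pola n x → Pre_pola n x → Spec_pola n x (pola n x)

-- ===== LEMMAS AND PROOFS =====

theorem int_pow_emod (a : Int) (b : Nat) (n : Int) : a ^ b % n = (a % n) ^ b % n :=
  (Int.ModEq.pow b (Int.emod_emod_of_dvd a dvd_rfl).symm).symm.symm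

theorem pyPowmodGo_zero (f : Nat) (a m r : Int) : pyPowmodGo f a 0 m r = r := by
  cases f <;> simp [pyPowmodGo]

-- A's accumulator loop computes result * a^b mod m
theorem pyPowmodGo_closed (f : Nat) (a b m r : Int) (hm : 0 < m) (hb : 1 ≤ b)
    (hf : b.toNat < f) : pyPowmodGo f a b m r = (r * a ^ b.toNat) % m := by
  induction f generalizing a b r with
  | zero => omega
  | succ f ih =>
    have hbpos : b > 0 := hb
    simp only [pyPowmodGo, if_pos hbpos,
      PySem.Int.floordiv_eq_ediv_of_pos (show (0:Int) < 2 by norm_num),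
      PySem.Int.mod_eq_emod_of_pos (show (0:Int) < 2 by norm_num),
      PySem.Int.mod_eq_emod_of_pos hm]
    by_cases h1 : b = 1
    · subst h1
      norm_num [pyPowmodGo_zero]
    · have hb2 : 2 ≤ b := by omega
      have hq : 1 ≤ b / 2 := by omega
      have hqf : (b / 2).toNat < f := by omega
      by_cases hodd : b % 2 = 0
      · have hbt : b.toNat = 2 * (b / 2).toNat := by omega
        simp only [hodd, ne_eq, not_true_eq_false, if_false]
        rw [ih _ _ _ hq hqf, Int.mul_emod r, ← int_pow_emod, ← Int.mul_emod, hbt,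
          pow_mul, sq]
      · have hbt : b.toNat = 2 * (b / 2).toNat + 1 := by omega
        simp only [hodd, ne_eq, not_false_eq_true, if_true]
        rw [ih _ _ _ hq hqf, Int.mul_emod (r * a % m), Int.emod_emod_of_dvd _ dvd_rfl,
          ← int_pow_emod, ← Int.mul_emod, hbt, pow_succ, pow_mul, sq]
        congr 1
        ring

-- B's recursive powmod computes a^b mod m
theorem bPowGo_closed (f : Nat) (a b m : Int) (hm : 0 < m) (hb : 1 ≤ b)
    (hf : b.toNat < f) : bPowGo f a b m = a ^ b.toNat % m := by
  induction f generalizing a b with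
  | zero => omega
  | succ f ih =>
    have hbpos : ¬ b ≤ 0 := by omega
    simp only [bPowGo, if_neg hbpos,
      PySem.Int.floordiv_eq_ediv_of_pos (show (0:Int) < 2 by norm_num),
      PySem.Int.mod_eq_emod_of_pos (show (0:Int) < 2 by norm_num),
      PySem.Int.mod_eq_emod_of_pos hm]
    by_cases h1 : b = 1
    · subst h1
      have hz : ∀ g : Nat, bPowGo g (a * a % m) 0 m = 1 := by
        intro g; cases g <;> simp [bPowGo]
      norm_num [hz]
    · have hb2 : 2 ≤ b := by omega
      have hq : 1 ≤ b / 2 := by omega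
      have hqf : (b / 2).toNat < f := by omega
      by_cases hodd : b % 2 = 0
      · have hbt : b.toNat = 2 * (b / 2).toNat := by omega
        simp only [hodd, ne_eq, not_true_eq_false, if_false]
        rw [ih _ _ hq hqf, ← int_pow_emod, hbt, pow_mul, sq]
      · have hbt : b.toNat = 2 * (b / 2).toNat + 1 := by omega
        simp only [hodd, ne_eq, not_false_eq_true, if_true]
        rw [ih _ _ hq hqf, Int.mul_emod, Int.emod_emod_of_dvd _ dvd_rfl,
          ← int_pow_emod, ← Int.mul_emod, hbt, pow_succ, pow_mul, sq]

theorem powmod_eq (a b m : Int) (hm : 0 < m) : pyPowmod a b m = bPow a b m := by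
  by_cases hb : 1 ≤ b
  · rw [pyPowmod, bPow, pyPowmodGo_closed _ _ _ _ _ hm hb (by omega),
        bPowGo_closed _ _ _ _ hm hb (by omega), one_mul]
  · have hb0 : b.toNat = 0 := by omega
    rw [pyPowmod, bPow, hb0]
    simp [pyPowmodGo, bPowGo, show ¬ b > 0 by omega, show b ≤ 0 by omega]

theorem pyPowmod_two (x n : Int) (hn : 0 < n) :
    pyPowmod x 2 n = PySem.Int.mod (x * x) n := by
  rw [pyPowmod, show Int.toNat 2 + 1 = 3 from rfl]
  rw [pyPowmodGo_closed 3 x 2 n 1 hn (by norm_num) (by norm_num),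
      PySem.Int.mod_eq_emod_of_pos hn]
  rw [show Int.toNat 2 = 2 from rfl, pow_two, one_mul]

theorem mrLoop_eq (n : Int) (hn : 0 < n) : ∀ (k : Nat) (x : Int),
    pyMrLoop k x n = bMrLoop k x n := by
  intro k
  induction k with
  | zero => intro x; rfl
  | succ k ih =>
    intro x
    simp only [pyMrLoop, bMrLoop, pyPowmod_two x n hn]
    split <;> simp [ih]

theorem mr_eq (n a : Int) (hn : 0 < n) : pyMr n a = bMr n a := by
  simp only [pyMr, bMr]
  obtain ⟨r, d⟩ := pyMrHalve ((n - 1).toNat + 1) 0 (n - 1)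
  simp only [powmod_eq a d n hn]
  split <;> simp [mrLoop_eq n hn]

theorem all_congr_mem (L : List Int) (f g : Int → Bool) (h : ∀ i ∈ L, f i = g i) :
    L.all f = L.all g := by
  induction L with
  | nil => rfl
  | cons a l ih => simp only [List.all_cons, h a (by simp), ih (fun i hi => h i (by simp [hi]))]

theorem checkLoop_le (k : Int) : ∀ (l : List Int) (c : Int),
    pyCheckLoop k l c ≤ c + l.length := by
  intro l
  induction l with
  | nil => intro c; simp [pyCheckLoop]
  | cons i rest ih =>
    intro c
    simp only [pyCheckLoop]
    split
    · simp only [List.length_cons]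
      push_cast
      omega
    · have := ih (c + 1)
      simp only [List.length_cons]
      push_cast at this ⊢
      omega

theorem checkLoop_eq_iff (k : Int) : ∀ (l : List Int) (c : Int),
    pyCheckLoop k l c = c + l.length ↔ l.all (fun i => pyMr k i) = true := by
  intro l
  induction l with
  | nil => intro c; simp [pyCheckLoop]
  | cons i rest ih =>
    intro c
    simp only [pyCheckLoop, List.all_cons, List.length_cons]
    by_cases h : pyMr k i = false
    · have hle := checkLoop_le k rest c
      simp only [h, if_true, Bool.false_and]
      push_cast
      constructor
      · intro hh; omega
      · intro hh; cases hh
    · have hi : pyMr k i = true := by revert h; cases pyMr k i <;> simp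
      rw [if_neg (by simp [hi]), hi]
      have hih := ih (c + 1)
      simp only [Bool.true_and]
      push_cast at hih ⊢
      rw [show c + ((rest.length : Int) + 1) = (c + 1) + rest.length by ring]
      exact hih

theorem check_eq (k : Int) : pyCheckPrime k = bCheckPrime k := by
  by_cases hk : k ≤ 71
  · simp [pyCheckPrime, bCheckPrime, hk, smallPrimes]
  · have hkpos : (0 : Int) < k := by omega
    have htake : smallPrimes.take 12 = [2, 3, 5, 7, 11, 13, 17, 19, 23, 29, 31, 37] := by
      decide
    simp only [pyCheckPrime, bCheckPrime, if_neg hk, htake]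
    have hiff : (pyCheckLoop k [2, 3, 5, 7, 11, 13, 17, 19, 23, 29, 31, 37] 0 = 12)
        ↔ (([2, 3, 5, 7, 11, 13, 17, 19, 23, 29, 31, 37] : List Int).all (fun i => pyMr k i) = true) := by
      rw [show (12 : Int) = 0 + (([2, 3, 5, 7, 11, 13, 17, 19, 23, 29, 31, 37] : List Int).length : Int) by norm_num]
      exact checkLoop_eq_iff k _ 0
    rw [show decide (pyCheckLoop k [2, 3, 5, 7, 11, 13, 17, 19, 23, 29, 31, 37] 0 = 12)
        = ([2, 3, 5, 7, 11, 13, 17, 19, 23, 29, 31, 37] : List Int).all (fun i => pyMr k i) by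
      simp only [decide_eq_decide.mpr hiff, Bool.decide_eq_true]]
    exact all_congr_mem _ _ _ (fun i _ => mr_eq k i hkpos)

theorem mod_natAbs_lt (a b : Int) (hb : b ≠ 0) :
    (PySem.Int.mod a b).natAbs < b.natAbs := by
  rcases lt_or_gt_of_ne hb with h | h
  · have := PySem.Int.mod_neg_bounds (a := a) h
    omega
  · have h1 := PySem.Int.mod_nonneg (a := a) h
    have h2 := PySem.Int.mod_lt (a := a) h
    omega

theorem pyGcdGo_mono (f1 : Nat) : ∀ (f2 : Nat) (a b : Int),
    b.natAbs < f1 → b.natAbs < f2 → pyGcdGo f1 a b = pyGcdGo f2 a b := by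
  induction f1 with
  | zero => intro f2 a b h _; omega
  | succ f1 ih =>
    intro f2 a b h1 h2
    cases f2 with
    | zero => omega
    | succ f2 =>
      simp only [pyGcdGo]
      by_cases hb : b = 0
      · simp [hb]
      · have hlt := mod_natAbs_lt a b hb
        simp only [hb, ne_eq, not_false_eq_true, if_true]
        exact ih f2 b (PySem.Int.mod a b) (by omega) (by omega)

theorem gcd_eq (a b : Int) (ha : 0 ≤ a) : pyGcd a b = bGcd a b := by
  unfold pyGcd bGcd
  by_cases h : b > a
  · rw [if_pos h]
    have hb0 : b ≠ 0 := by omega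
    have hfirst : pyGcdGo (a.natAbs + b.natAbs + 1) a b
        = pyGcdGo (a.natAbs + b.natAbs) b a := by
      simp only [pyGcdGo, hb0, ne_eq, not_false_eq_true, if_true,
        PySem.Int.mod_eq_emod_of_pos (show (0:Int) < b by omega), Int.emod_eq_of_lt ha h]
    rw [hfirst]
    exact pyGcdGo_mono _ _ b a (by omega) (by omega)
  · rw [if_neg h]

theorem rho_eq (f : Nat) : ∀ (x y n : Int), pyRho f x y n = bRho f x y n := by
  induction f with
  | zero => intro x y n; rfl
  | succ f ih =>
    intro x y n
    simp only [pyRho, bRho, pyG]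
    rw [gcd_eq _ _ (Int.natCast_nonneg _)]
    split <;> simp [ih]

theorem trial_eq (n : Int) : ∀ (l : List Int),
    pyTrial n l = l.find? (fun i => PySem.Int.mod n i == 0) := by
  intro l
  induction l with
  | nil => rfl
  | cons i rest ih =>
    simp only [pyTrial, List.find?]
    by_cases h : PySem.Int.mod n i = 0
    · simp [h]
    · have hb : (PySem.Int.mod n i == 0) = false := by simp [h]
      rw [hb, if_neg h, ih]

theorem polaFuel_eq_bIter (fuel : Nat) : ∀ (n x : Int),
    polaFuel fuel n x = bIter fuel n x x := by
  induction fuel with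
  | zero => intro n x; rfl
  | succ f ih =>
    intro n x
    simp only [polaFuel, bIter, bStep, ← check_eq, bTrial, ← trial_eq,
      show pyTrialList = smallPrimes from rfl, ← rho_eq]
    by_cases hp : pyCheckPrime n = true
    · simp [hp]
    · simp only [hp, if_false, Bool.false_eq_true]
      cases pyTrial n smallPrimes with
      | some i => simp
      | none =>
        simp only
        by_cases hd : pyRho (n.natAbs + 2) x x n = n
        · simp [hd, ih]
        · by_cases hq : pyCheckPrime (pyRho (n.natAbs + 2) x x n) = true
          · simp [hd, hq]
          · simp [hd, hq, ih]

-- ===== VERDICT =====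
theorem pola_spec : Claim_equal_pola := by
  intro n x _hd _hp
  unfold Spec_pola pola pola_alt
  exact polaFuel_eq_bIter _ n x
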